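-- pv_equiv track=rewrite | github.com/marrcusviniciuss/validationtool | core/id_generator.py | _infer_pool
-- ===== SOURCE A (Python) =====
-- import string
--
-- HEX_LOWER = "0123456789abcdef"
--
-- HEX_UPPER = "0123456789ABCDEF"
--
-- DIGITS = string.digits
--
-- LOWER = string.ascii_lowercase
--
-- UPPER = string.ascii_uppercase
--
-- ALPHA_MIXED = string.ascii_letters
--
-- ALNUM_LOWER = string.ascii_lowercase + string.digits
--
-- ALNUM_UPPER = string.ascii_uppercase + string.digits
--
-- ALNUM_MIXED = string.ascii_letters + string.digits
--
-- def _infer_pool(chars: set[str]) -> tuple[str, str]: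
--     if chars and all(char.isdigit() for char in chars):
--         return "digit", DIGITS
--     if chars and all(char in HEX_LOWER for char in chars):
--         return "hex_lower", HEX_LOWER
--     if chars and all(char in HEX_UPPER for char in chars):
--         return "hex_upper", HEX_UPPER
--     if chars and all(char.islower() and char.isalpha() for char in chars):
--         return "lower", LOWER
--     if chars and all(char.isupper() and char.isalpha() for char in chars):
--         return "upper", UPPER
--     if chars and all(char.isalpha() for char in chars):
--         return "alpha_mixed", ALPHA_MIXED
--     if chars and all(char.isalnum() for char in chars):
--         has_lower = any(char.islower() for char in chars)
--         has_upper = any(char.isupper() for char in chars)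
--         if has_lower and not has_upper:
--             return "alnum_lower", ALNUM_LOWER
--         if has_upper and not has_lower:
--             return "alnum_upper", ALNUM_UPPER
--         return "alnum_mixed", ALNUM_MIXED
--     return "literal_set", "".join(sorted(chars))
-- ===== SOURCE B (Python) =====
-- import string
--
-- HEX_LOWER = "0123456789abcdef"
-- HEX_UPPER = "0123456789ABCDEF"
-- DIGITS = string.digits
-- LOWER = string.ascii_lowercase
-- UPPER = string.ascii_uppercase
-- ALPHA_MIXED = string.ascii_letters
-- ALNUM_LOWER = string.ascii_lowercase + string.digits
-- ALNUM_UPPER = string.ascii_uppercase + string.digits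
-- ALNUM_MIXED = string.ascii_letters + string.digits
--
-- def _infer_pool(chars):
--     if not chars:
--         return "literal_set", ""
--     all_digit = all_hexl = all_hexu = all_lower = all_upper = all_alpha = all_alnum = True
--     any_lower = any_upper = False
--     for ch in chars:
--         lo = ch.islower()
--         up = ch.isupper()
--         al = ch.isalpha()
--         all_digit = all_digit and ch.isdigit()
--         all_hexl = all_hexl and (ch in HEX_LOWER)
--         all_hexu = all_hexu and (ch in HEX_UPPER)
--         all_lower = all_lower and lo and al
--         all_upper = all_upper and up and al
--         all_alpha = all_alpha and al
--         all_alnum = all_alnum and ch.isalnum()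
--         any_lower = any_lower or lo
--         any_upper = any_upper or up
--     if all_digit:
--         return "digit", DIGITS
--     if all_hexl:
--         return "hex_lower", HEX_LOWER
--     if all_hexu:
--         return "hex_upper", HEX_UPPER
--     if all_lower:
--         return "lower", LOWER
--     if all_upper:
--         return "upper", UPPER
--     if all_alpha:
--         return "alpha_mixed", ALPHA_MIXED
--     if all_alnum:
--         if any_lower and not any_upper:
--             return "alnum_lower", ALNUM_LOWER
--         if any_upper and not any_lower:
--             return "alnum_upper", ALNUM_UPPER
--         return "alnum_mixed", ALNUM_MIXED
--     return "literal_set", "".join(sorted(chars))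
-- ===== Notes on version B (the rewrite author's own statement) =====
-- stated objective: alternative
-- what changed: Replaces A's seven separate all()/any() scans (plus the in-branch any scans) over the char set with a single aggregating pass that accumulates nine boolean flags, followed by the same ordered flag-based classification.
import Mathlib
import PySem

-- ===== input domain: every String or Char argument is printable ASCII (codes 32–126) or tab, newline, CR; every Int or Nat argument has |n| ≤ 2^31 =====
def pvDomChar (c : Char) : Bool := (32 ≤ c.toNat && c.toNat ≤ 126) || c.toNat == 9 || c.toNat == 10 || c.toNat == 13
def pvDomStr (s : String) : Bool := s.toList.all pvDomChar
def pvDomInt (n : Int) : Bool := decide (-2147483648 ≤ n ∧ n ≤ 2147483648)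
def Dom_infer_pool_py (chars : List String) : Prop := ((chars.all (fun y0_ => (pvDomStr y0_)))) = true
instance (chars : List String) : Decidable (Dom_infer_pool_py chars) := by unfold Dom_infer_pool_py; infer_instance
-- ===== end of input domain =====

-- B replaces A's seven separate all()/any() scans over the set by one aggregating pass
-- that collects boolean flags, then runs the same ordered classification (objective: alternative).


-- ===== PORT A =====
-- module constants
def pvDIGITS : String := "0123456789"
def pvHEX_LOWER : String := "0123456789abcdef"
def pvHEX_UPPER : String := "0123456789ABCDEF"
def pvLOWER : String := "abcdefghijklmnopqrstuvwxyz"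
def pvUPPER : String := "ABCDEFGHIJKLMNOPQRSTUVWXYZ"
def pvALPHA_MIXED : String := "abcdefghijklmnopqrstuvwxyzABCDEFGHIJKLMNOPQRSTUVWXYZ"
def pvALNUM_LOWER : String := "abcdefghijklmnopqrstuvwxyz0123456789"
def pvALNUM_UPPER : String := "ABCDEFGHIJKLMNOPQRSTUVWXYZ0123456789"
def pvALNUM_MIXED : String := "abcdefghijklmnopqrstuvwxyzABCDEFGHIJKLMNOPQRSTUVWXYZ0123456789"

-- Python str.islower() / str.isupper(): at least one cased character and every cased
-- character lower (resp. upper). Exact on the ASCII Dom, where the cased characters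
-- are precisely a-z and A-Z (PySem has no string-level islower/isupper, so hand-ported).
def pyStrIslower (s : String) : Bool :=
  s.toList.any PySem.Chars.islower && s.toList.all (fun c => !(PySem.Chars.isupper c))
def pyStrIsupper (s : String) : Bool :=
  s.toList.any PySem.Chars.isupper && s.toList.all (fun c => !(PySem.Chars.islower c))

def infer_pool_py (chars : List String) : String × String :=
  if !chars.isEmpty && chars.all (fun c => PySem.Str.strIsdigit c) then
    ("digit", pvDIGITS)
  else if !chars.isEmpty && chars.all (fun c => PySem.Str.isIn c pvHEX_LOWER) then
    ("hex_lower", pvHEX_LOWER)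
  else if !chars.isEmpty && chars.all (fun c => PySem.Str.isIn c pvHEX_UPPER) then
    ("hex_upper", pvHEX_UPPER)
  else if !chars.isEmpty && chars.all (fun c => pyStrIslower c && PySem.Str.strIsalpha c) then
    ("lower", pvLOWER)
  else if !chars.isEmpty && chars.all (fun c => pyStrIsupper c && PySem.Str.strIsalpha c) then
    ("upper", pvUPPER)
  else if !chars.isEmpty && chars.all (fun c => PySem.Str.strIsalpha c) then
    ("alpha_mixed", pvALPHA_MIXED)
  else if !chars.isEmpty && chars.all (fun c => PySem.Str.strIsalnum c) then
    let has_lower := chars.any (fun c => pyStrIslower c)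
    let has_upper := chars.any (fun c => pyStrIsupper c)
    if has_lower && !has_upper then ("alnum_lower", pvALNUM_LOWER)
    else if has_upper && !has_lower then ("alnum_upper", pvALNUM_UPPER)
    else ("alnum_mixed", pvALNUM_MIXED)
  else
    ("literal_set", PySem.Str.join "" (PySem.List.sorted chars (fun x => x) false))

-- ===== PORT B =====
-- flag state: (all_digit, all_hexl, all_hexu, all_lower, all_upper, all_alpha, all_alnum, any_lower, any_upper)
def pvFlags := Bool × Bool × Bool × Bool × Bool × Bool × Bool × Bool × Bool

def pvStep (s : pvFlags) (ch : String) : pvFlags :=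
  let lo := pyStrIslower ch
  let up := pyStrIsupper ch
  let al := PySem.Str.strIsalpha ch
  ( s.1 && PySem.Str.strIsdigit ch,
    s.2.1 && PySem.Str.isIn ch pvHEX_LOWER,
    s.2.2.1 && PySem.Str.isIn ch pvHEX_UPPER,
    s.2.2.2.1 && lo && al,
    s.2.2.2.2.1 && up && al,
    s.2.2.2.2.2.1 && al,
    s.2.2.2.2.2.2.1 && PySem.Str.strIsalnum ch,
    s.2.2.2.2.2.2.2.1 || lo,
    s.2.2.2.2.2.2.2.2 || up )

def infer_pool_py_alt (chars : List String) : String × String :=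
  if chars.isEmpty then ("literal_set", "")
  else
    let st : pvFlags :=
      chars.foldl pvStep (true, true, true, true, true, true, true, false, false)
    if st.1 then ("digit", pvDIGITS)
    else if st.2.1 then ("hex_lower", pvHEX_LOWER)
    else if st.2.2.1 then ("hex_upper", pvHEX_UPPER)
    else if st.2.2.2.1 then ("lower", pvLOWER)
    else if st.2.2.2.2.1 then ("upper", pvUPPER)
    else if st.2.2.2.2.2.1 then ("alpha_mixed", pvALPHA_MIXED)
    else if st.2.2.2.2.2.2.1 then
      if st.2.2.2.2.2.2.2.1 && !st.2.2.2.2.2.2.2.2 then ("alnum_lower", pvALNUM_LOWER)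
      else if st.2.2.2.2.2.2.2.2 && !st.2.2.2.2.2.2.2.1 then ("alnum_upper", pvALNUM_UPPER)
      else ("alnum_mixed", pvALNUM_MIXED)
    else ("literal_set", PySem.Str.join "" (PySem.List.sorted chars (fun x => x) false))

-- ===== PRECONDITION & SPEC =====
def Spec_infer_pool_py (chars : List String) (out : String × String) : Prop := out = infer_pool_py_alt chars
instance (chars : List String) (out : String × String) : Decidable (Spec_infer_pool_py chars out) := by unfold Spec_infer_pool_py; infer_instance

-- ===== CLAIM (what is proved, stated in full; the proofs are below) =====
def Claim_equal_infer_pool_py : Prop := ∀ (chars : List String), Dom_infer_pool_py chars → Spec_infer_pool_py chars (infer_pool_py chars)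

-- ===== LEMMAS AND PROOFS =====

-- B's single fold computes exactly the nine all/any aggregates A's repeated scans compute.
theorem pvStep_foldl (chars : List String) (b1 b2 b3 b4 b5 b6 b7 b8 b9 : Bool) :
    chars.foldl pvStep (b1, b2, b3, b4, b5, b6, b7, b8, b9) =
      ( b1 && chars.all (fun c => PySem.Str.strIsdigit c),
        b2 && chars.all (fun c => PySem.Str.isIn c pvHEX_LOWER),
        b3 && chars.all (fun c => PySem.Str.isIn c pvHEX_UPPER),
        b4 && chars.all (fun c => pyStrIslower c && PySem.Str.strIsalpha c),
        b5 && chars.all (fun c => pyStrIsupper c && PySem.Str.strIsalpha c),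
        b6 && chars.all (fun c => PySem.Str.strIsalpha c),
        b7 && chars.all (fun c => PySem.Str.strIsalnum c),
        b8 || chars.any (fun c => pyStrIslower c),
        b9 || chars.any (fun c => pyStrIsupper c) ) := by
  induction chars generalizing b1 b2 b3 b4 b5 b6 b7 b8 b9 with
  | nil => simp
  | cons hd tl ih =>
      simp only [List.foldl_cons, List.all_cons, List.any_cons, pvStep, ih]
      simp only [Bool.and_assoc, Bool.or_assoc]

theorem infer_pool_eq (chars : List String) : infer_pool_py chars = infer_pool_py_alt chars := by
  cases chars with
  | nil => rfl
  | cons hd tl =>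
      simp only [infer_pool_py, infer_pool_py_alt, pvStep_foldl, List.isEmpty_cons,
        Bool.not_false, Bool.true_and, Bool.false_or]
      rfl

-- ===== VERDICT (by name: the statement is the Claim_ definition above) =====
theorem infer_pool_py_spec : Claim_equal_infer_pool_py := by
  intro chars _
  unfold Spec_infer_pool_py
  exact infer_pool_eq chars
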